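-- pv_equiv track=rewrite | github.com/tbowman01/AI-Cohort-July-2025 | backend/services/story_generator.py | validate_gherkin_syntax
-- ===== SOURCE A (Python) =====
-- from typing import Dict, List, Tuple
--
-- def validate_gherkin_syntax(
--         gherkin_content: str) -> Tuple[bool, List[str]]:
--     """
--     Validate Gherkin syntax and return issues if any
--
--     Args:
--         gherkin_content: The Gherkin content to validate
--
--     Returns:
--         Tuple of (is_valid, list_of_issues)
--     """
--     issues = []
--     is_valid = True
--
--     try:
--         lines = gherkin_content.split('\n')
--
--         # Check for required keywords
--         has_feature = any(line.strip().startswith('Feature:')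
--                           for line in lines)
--         if not has_feature:
--             issues.append("Missing 'Feature:' declaration")
--             is_valid = False
--
--         has_scenario = any(line.strip().startswith('Scenario:')
--                            for line in lines)
--         if not has_scenario:
--             issues.append("Missing 'Scenario:' declaration")
--             is_valid = False
--
--         # Check for Given-When-Then structure
--         scenario_started = False
--         has_given = False
--         has_when = False
--         has_then = False
--
--         for line in lines:
--             stripped = line.strip()
--             if stripped.startswith('Scenario:'):
--                 scenario_started = True
--                 has_given = has_when = has_then = False
--             elif scenario_started:
--                 if stripped.startswith('Given'):
--                     has_given = True
--                 elif stripped.startswith('When'):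
--                     has_when = True
--                 elif stripped.startswith('Then'):
--                     has_then = True
--
--         if scenario_started and not (has_given and has_when and has_then):
--             missing_steps = []
--             if not has_given:
--                 missing_steps.append('Given')
--             if not has_when:
--                 missing_steps.append('When')
--             if not has_then:
--                 missing_steps.append('Then')
--             issues.append(f"Missing step(s): {', '.join(missing_steps)}")
--             is_valid = False
--
--     except Exception as e:
--         issues.append(f"Syntax validation error: {str(e)}")
--         is_valid = False
--
--     return is_valid, issues
-- ===== SOURCE B (Python) =====
-- def validate_gherkin_syntax(gherkin_content):
--     """Single-pass validation: one loop computes all flags, validity = no issues."""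
--     has_feature = has_scenario = scenario_started = False
--     has_given = has_when = has_then = False
--     for line in gherkin_content.split('\n'):
--         s = line.strip()
--         if s.startswith('Feature:'):
--             has_feature = True
--         if s.startswith('Scenario:'):
--             has_scenario = True
--             scenario_started = True
--             has_given = has_when = has_then = False
--         elif scenario_started:
--             if s.startswith('Given'):
--                 has_given = True
--             elif s.startswith('When'):
--                 has_when = True
--             elif s.startswith('Then'):
--                 has_then = True
--     issues = []
--     if not has_feature:
--         issues.append("Missing 'Feature:' declaration")
--     if not has_scenario:
--         issues.append("Missing 'Scenario:' declaration")
--     if scenario_started and not (has_given and has_when and has_then):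
--         missing = [name for name, ok in (('Given', has_given),
--                                          ('When', has_when),
--                                          ('Then', has_then)) if not ok]
--         issues.append("Missing step(s): " + ', '.join(missing))
--     return not issues, issues
-- ===== Notes on version B (the rewrite author's own statement) =====
-- stated objective: simpler
-- what changed: Replaces A's three separate scans (two any() passes plus the step loop) and the threaded is_valid flag with one single pass over the lines that maintains all six flags at once; validity is then computed as the emptiness of the issues list.
import Mathlib
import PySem

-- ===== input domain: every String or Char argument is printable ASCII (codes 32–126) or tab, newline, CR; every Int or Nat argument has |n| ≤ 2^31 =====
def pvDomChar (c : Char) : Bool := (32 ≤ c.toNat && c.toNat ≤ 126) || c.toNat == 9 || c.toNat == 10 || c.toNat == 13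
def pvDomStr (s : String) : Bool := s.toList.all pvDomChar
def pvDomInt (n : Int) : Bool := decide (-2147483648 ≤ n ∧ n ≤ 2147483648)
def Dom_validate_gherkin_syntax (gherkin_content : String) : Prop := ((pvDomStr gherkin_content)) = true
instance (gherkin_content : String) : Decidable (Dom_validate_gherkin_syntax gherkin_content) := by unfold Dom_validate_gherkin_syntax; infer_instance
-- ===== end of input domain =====

-- B is a single pass over the lines maintaining all flags at once (simpler decomposition); same return value as A.

-- ===== PORT A =====
-- the body of A's 'for line in lines' step loop, over state (scenario_started, has_given, has_when, has_then)
def vgsStepA (st : Bool × Bool × Bool × Bool) (line : String) : Bool × Bool × Bool × Bool :=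
  let stripped := PySem.Str.strip line
  if PySem.Str.startswith stripped "Scenario:" then (true, false, false, false)
  else if st.1 then
    if PySem.Str.startswith stripped "Given" then (st.1, true, st.2.2.1, st.2.2.2)
    else if PySem.Str.startswith stripped "When" then (st.1, st.2.1, true, st.2.2.2)
    else if PySem.Str.startswith stripped "Then" then (st.1, st.2.1, st.2.2.1, true)
    else st
  else st

def validate_gherkin_syntax (gherkin_content : String) : Bool × List String :=
  let issues : List String := []
  let is_valid := true
  let lines := (PySem.Str.split? gherkin_content "\n").getD []
  let has_feature := lines.any (fun line => PySem.Str.startswith (PySem.Str.strip line) "Feature:")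
  let (issues, is_valid) :=
    if !has_feature then (issues ++ ["Missing 'Feature:' declaration"], false) else (issues, is_valid)
  let has_scenario := lines.any (fun line => PySem.Str.startswith (PySem.Str.strip line) "Scenario:")
  let (issues, is_valid) :=
    if !has_scenario then (issues ++ ["Missing 'Scenario:' declaration"], false) else (issues, is_valid)
  let st := lines.foldl vgsStepA (false, false, false, false)
  let (issues, is_valid) :=
    if st.1 && !(st.2.1 && st.2.2.1 && st.2.2.2) then
      let missing_steps : List String :=
        (if !st.2.1 then ["Given"] else []) ++
        (if !st.2.2.1 then ["When"] else []) ++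
        (if !st.2.2.2 then ["Then"] else [])
      (issues ++ ["Missing step(s): " ++ PySem.Str.join ", " missing_steps], false)
    else (issues, is_valid)
  (is_valid, issues)

-- ===== PORT B =====
-- B's single loop body, over state (has_feature, has_scenario, scenario_started, has_given, has_when, has_then)
def vgsStepB (st : Bool × Bool × Bool × Bool × Bool × Bool) (line : String) :
    Bool × Bool × Bool × Bool × Bool × Bool :=
  let s := PySem.Str.strip line
  let hf := st.1 || PySem.Str.startswith s "Feature:"
  if PySem.Str.startswith s "Scenario:" then (hf, true, true, false, false, false)
  else if st.2.2.1 then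
    if PySem.Str.startswith s "Given" then (hf, st.2.1, st.2.2.1, true, st.2.2.2.2.1, st.2.2.2.2.2)
    else if PySem.Str.startswith s "When" then (hf, st.2.1, st.2.2.1, st.2.2.2.1, true, st.2.2.2.2.2)
    else if PySem.Str.startswith s "Then" then (hf, st.2.1, st.2.2.1, st.2.2.2.1, st.2.2.2.2.1, true)
    else (hf, st.2.1, st.2.2.1, st.2.2.2.1, st.2.2.2.2.1, st.2.2.2.2.2)
  else (hf, st.2.1, st.2.2.1, st.2.2.2.1, st.2.2.2.2.1, st.2.2.2.2.2)

def validate_gherkin_syntax_alt (gherkin_content : String) : Bool × List String :=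
  let st := ((PySem.Str.split? gherkin_content "\n").getD []).foldl vgsStepB
              (false, false, false, false, false, false)
  let issues : List String :=
    (if !st.1 then ["Missing 'Feature:' declaration"] else []) ++
    (if !st.2.1 then ["Missing 'Scenario:' declaration"] else []) ++
    (if st.2.2.1 && !(st.2.2.2.1 && st.2.2.2.2.1 && st.2.2.2.2.2) then
      let missing : List String :=
        (if !st.2.2.2.1 then ["Given"] else []) ++
        (if !st.2.2.2.2.1 then ["When"] else []) ++
        (if !st.2.2.2.2.2 then ["Then"] else [])
      ["Missing step(s): " ++ PySem.Str.join ", " missing]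
     else [])
  (issues.isEmpty, issues)

-- ===== PRECONDITION & SPEC =====
def Spec_validate_gherkin_syntax (gherkin_content : String) (out : Bool × List String) : Prop := out = validate_gherkin_syntax_alt gherkin_content
instance (gherkin_content : String) (out : Bool × List String) : Decidable (Spec_validate_gherkin_syntax gherkin_content out) := by unfold Spec_validate_gherkin_syntax; infer_instance

-- ===== CLAIM (what is proved, stated in full; the proofs are below) =====
def Claim_equal_validate_gherkin_syntax : Prop := ∀ (gherkin_content : String), Dom_validate_gherkin_syntax gherkin_content → Spec_validate_gherkin_syntax gherkin_content (validate_gherkin_syntax gherkin_content)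

-- ===== LEMMAS AND PROOFS =====

-- B's single fold computes A's two any-scans (or-ed with the incoming flags) and A's step fold.
theorem vgs_fold_split (lines : List String) (hf hs ss hg hw ht : Bool) :
    lines.foldl vgsStepB (hf, hs, ss, hg, hw, ht) =
      (hf || lines.any (fun line => PySem.Str.startswith (PySem.Str.strip line) "Feature:"),
       hs || lines.any (fun line => PySem.Str.startswith (PySem.Str.strip line) "Scenario:"),
       lines.foldl vgsStepA (ss, hg, hw, ht)) := by
  induction lines generalizing hf hs ss hg hw ht with
  | nil => simp
  | cons l rest ih =>
    simp only [List.foldl_cons, List.any_cons, vgsStepA, vgsStepB]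
    split_ifs <;> rw [ih] <;> clear ih <;> simp_all [Bool.or_assoc]

theorem validate_gherkin_syntax_spec : Claim_equal_validate_gherkin_syntax := by
  intro g _
  unfold Spec_validate_gherkin_syntax validate_gherkin_syntax validate_gherkin_syntax_alt
  rw [vgs_fold_split]
  simp only [Bool.false_or]
  rcases h : ((PySem.Str.split? g "\n").getD []).foldl vgsStepA (false, false, false, false) with
    ⟨ss, hg, hw, ht⟩
  cases ((PySem.Str.split? g "\n").getD []).any (fun line => PySem.Str.startswith (PySem.Str.strip line) "Feature:") <;>
  cases ((PySem.Str.split? g "\n").getD []).any (fun line => PySem.Str.startswith (PySem.Str.strip line) "Scenario:") <;>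
  cases ss <;> cases hg <;> cases hw <;> cases ht <;> rfl
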